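-- pv_equiv track=rewrite | github.com/akio7624/YomeiriTools | utils/Utils.py | get_table_end_padding_count
-- ===== SOURCE A (Python) =====
-- def get_table_end_padding_count(current: int) -> int:
--     if current % 2048 == 0:
--         return 0
--
--     n = int(current / 2048)
--
--     while True:
--         block_size = (n * 2048)
--         if current <= block_size:
--             return block_size - current
--         n += 1
-- ===== SOURCE B (Python) =====
-- def get_table_end_padding_count(current: int) -> int:
--     return (2048 - current % 2048) % 2048
-- ===== Notes on version B (the rewrite author's own statement) =====
-- stated objective: simpler
-- what changed: Replaced the increment-until-block-boundary search loop (plus the exact-multiple special case) with a single closed-form modular expression (2048 - current % 2048) % 2048.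
import Mathlib
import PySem

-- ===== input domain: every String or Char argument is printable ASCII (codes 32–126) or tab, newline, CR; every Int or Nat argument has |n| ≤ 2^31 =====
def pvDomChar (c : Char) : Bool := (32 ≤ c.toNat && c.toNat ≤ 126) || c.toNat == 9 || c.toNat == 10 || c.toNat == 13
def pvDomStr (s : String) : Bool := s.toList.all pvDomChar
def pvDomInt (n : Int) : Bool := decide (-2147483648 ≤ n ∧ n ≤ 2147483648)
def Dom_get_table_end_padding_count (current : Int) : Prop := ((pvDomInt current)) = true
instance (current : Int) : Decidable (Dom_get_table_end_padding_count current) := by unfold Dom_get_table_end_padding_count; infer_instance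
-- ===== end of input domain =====

-- B replaces A's increment-until-boundary search loop by one closed-form modular expression; objective: simpler.

-- ===== PORT A =====
-- the 'while True' loop: n increases until current ≤ n*2048, then returns n*2048 - current
def pvALoop (current n : Int) : Int :=
  if current ≤ n * 2048 then n * 2048 - current
  else pvALoop current (n + 1)
termination_by (current - n * 2048).toNat
decreasing_by omega

-- int(current/2048): Python true division then int() truncation toward zero; on |current| ≤ 2^31
-- the float quotient by 2^11 is exact, so this is exactly Int.tdiv (truncation toward zero)
def get_table_end_padding_count (current : Int) : Int :=
  if PySem.Int.mod current 2048 = 0 then 0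
  else pvALoop current (Int.tdiv current 2048)

-- ===== PORT B =====
def get_table_end_padding_count_alt (current : Int) : Int :=
  PySem.Int.mod (2048 - PySem.Int.mod current 2048) 2048

-- ===== PRECONDITION & SPEC =====
def Spec_get_table_end_padding_count (current : Int) (out : Int) : Prop := out = get_table_end_padding_count_alt current
instance (current : Int) (out : Int) : Decidable (Spec_get_table_end_padding_count current out) := by unfold Spec_get_table_end_padding_count; infer_instance

-- ===== CLAIM (what is proved, stated in full; the proofs are below) =====
def Claim_equal_get_table_end_padding_count : Prop := ∀ (current : Int), Dom_get_table_end_padding_count current → Spec_get_table_end_padding_count current (get_table_end_padding_count current)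

-- ===== LEMMAS AND PROOFS =====

theorem pvALoop_done (current n : Int) (h : current ≤ n * 2048) :
    pvALoop current n = n * 2048 - current := by
  rw [pvALoop]; simp [h]

theorem pvALoop_step (current n : Int) (h : ¬ current ≤ n * 2048) :
    pvALoop current n = pvALoop current (n + 1) := by
  rw [pvALoop]; simp [h]

-- truncating division related to floor division off multiples
theorem tdiv_2048_of_pos (c : Int) (h2 : 0 ≤ c) : c.tdiv 2048 = c / 2048 :=
  Int.tdiv_eq_ediv_of_nonneg h2

theorem tdiv_2048_of_neg (c : Int) (h : ¬ (2048:Int) ∣ c) (h2 : c < 0) :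
    c.tdiv 2048 = c / 2048 + 1 := by
  rw [Int.tdiv_eq_ediv]; simp [h, Int.not_le.mpr h2]

-- ===== VERDICT (by name: the statement is the Claim_ definition above) =====
theorem get_table_end_padding_count_spec : Claim_equal_get_table_end_padding_count := by
  intro c _
  unfold Spec_get_table_end_padding_count get_table_end_padding_count get_table_end_padding_count_alt
  have hm : PySem.Int.mod c 2048 = c % 2048 := PySem.Int.mod_eq_emod_of_pos (by norm_num)
  have hm2 : PySem.Int.mod (2048 - c % 2048) 2048 = (2048 - c % 2048) % 2048 :=
    PySem.Int.mod_eq_emod_of_pos (by norm_num)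
  rw [hm, hm2]
  by_cases h0 : c % 2048 = 0
  · simp [h0]
  · have hb : 0 ≤ c % 2048 ∧ c % 2048 < 2048 := ⟨Int.emod_nonneg c (by norm_num), Int.emod_lt_of_pos c (by norm_num)⟩
    have hdvd : ¬ (2048:Int) ∣ c := by
      intro hd; exact h0 (Int.emod_eq_zero_of_dvd hd)
    have hq : c % 2048 = c - 2048 * (c / 2048) := by
      have := Int.mul_ediv_add_emod c 2048; omega
    rcases lt_trichotomy c 0 with hneg | hz | hpos
    · -- n starts at ediv+1; loop returns immediately
      rw [if_neg h0, tdiv_2048_of_neg c hdvd hneg, pvALoop_done _ _ (by omega)]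
      omega
    · exact absurd (by simp [hz]) h0
    · -- n starts at ediv; one step, then return
      rw [if_neg h0, tdiv_2048_of_pos c (le_of_lt hpos),
        pvALoop_step _ _ (by omega), pvALoop_done _ _ (by omega)]
      omega
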